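-- pv_equiv track=rewrite | github.com/nandito/advent-of-code-2023 | day1/part2.py | get_number_words
-- ===== SOURCE A (Python) =====
-- number_word_list = [
--     "one",
--     "two",
--     "three",
--     "four",
--     "five",
--     "six",
--     "seven",
--     "eight",
--     "nine",
-- ]
--
-- NumberIndicesDict = dict[str, list[int]]
--
-- def find_all(a_str: str, sub: str):
--     """
--     Find all occurrences of a substring in a string.
--     :param a_str: string to search in
--     :param sub: substring to search for
--     :return: generator of all occurrences
--     """
--     start = 0
--     while True:
--         start = a_str.find(sub, start)
--         if start == -1:
--             return
--         yield start
--         start += len(sub)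
--
-- def get_number_words(line) -> NumberIndicesDict:
--     """
--     Get the number words and their index in a string.
--     :param line: string to search in
--     :return: dictionary of number words and their indices in an array
--     """
--     matches = {}
--     for idx, word in enumerate(number_word_list):
--         word_matches = list(find_all(line, word))
--         if len(word_matches):
--             num = idx + 1
--             matches[str(num)] = word_matches
--
--     return matches
-- ===== SOURCE B (Python) =====
-- number_word_list = [
--     "one",
--     "two",
--     "three",
--     "four",
--     "five",
--     "six",
--     "seven",
--     "eight",
--     "nine",
-- ]
--
--
-- def get_number_words(line):
--     """Single left-to-right pass: at each index test each number word in place."""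
--     buckets = [[] for _ in number_word_list]
--     for i in range(len(line)):
--         buckets = [
--             b + [i] if line[i:i + len(w)] == w else b
--             for w, b in zip(number_word_list, buckets)
--         ]
--     return {str(k + 1): b for k, b in enumerate(buckets) if b}
-- ===== Notes on version B (the rewrite author's own statement) =====
-- stated objective: alternative
-- what changed: Replaces A's word-by-word repeated str.find scans (one pass per number word) with a single left-to-right pass over the string that tests all nine number words at each index and fills per-word buckets.
import Mathlib
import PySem

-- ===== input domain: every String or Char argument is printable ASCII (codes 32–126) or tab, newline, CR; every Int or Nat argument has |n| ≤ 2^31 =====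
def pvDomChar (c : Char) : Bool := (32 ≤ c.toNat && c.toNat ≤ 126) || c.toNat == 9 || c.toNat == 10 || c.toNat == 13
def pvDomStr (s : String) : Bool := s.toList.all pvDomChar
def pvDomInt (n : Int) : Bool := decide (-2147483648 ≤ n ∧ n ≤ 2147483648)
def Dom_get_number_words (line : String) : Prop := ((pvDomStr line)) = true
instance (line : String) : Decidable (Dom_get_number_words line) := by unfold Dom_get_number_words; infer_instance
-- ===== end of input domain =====

-- B replaces A's word-by-word repeated `str.find` scans with one left-to-right pass over the
-- string testing all nine words at each index (objective: alternative single-pass decomposition).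

-- ===== PORT A =====
def number_word_list : List String :=
  ["one", "two", "three", "four", "five", "six", "seven", "eight", "nine"]

-- find_all: repeated line.find(sub, start) with start += len(sub) after each hit.
-- Fuel bounds the iteration count (start strictly grows for the non-empty words A uses).
def findAllAux (s sub : List Char) (start : Nat) (fuel : Nat) : List Int :=
  match fuel with
  | 0 => []
  | fuel + 1 =>
    let r := PySem.Chars.findFrom s sub (start : Int)
    if r = -1 then []
    else r :: findAllAux s sub (r.toNat + sub.length) fuel

def findAll (line sub : String) : List Int :=
  findAllAux line.toList sub.toList 0 (line.toList.length + 1)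

def get_number_words (line : String) : List (String × List Int) :=
  ((PySem.List.enumerate number_word_list).foldl
    (fun d iw =>
      let wm := findAll line iw.2
      if wm.length ≠ 0 then d.insert (PySem.Int.toStr (iw.1 + 1)) wm else d)
    PySem.Dict.empty).items

-- ===== PORT B =====
def get_number_words_alt (line : String) : List (String × List Int) :=
  let s := line.toList
  let ws := number_word_list.map String.toList
  let buckets :=
    (List.range s.length).foldl
      (fun (bs : List (List Int)) (i : Nat) =>
        List.zipWith
          (fun w b =>
            if PySem.List.slice s (some (i : Int)) (some ((i : Int) + (w.length : Int))) = w
            then b ++ [(i : Int)] else b)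
          ws bs)
      (ws.map fun _ => ([] : List Int))
  (PySem.List.enumerate buckets).filterMap
    (fun kb => if kb.2 = [] then none else some (PySem.Int.toStr (kb.1 + 1), kb.2))

-- ===== PRECONDITION & SPEC =====
def Spec_get_number_words (line : String) (out : List (String × List Int)) : Prop := out = get_number_words_alt line
instance (line : String) (out : List (String × List Int)) : Decidable (Spec_get_number_words line out) := by unfold Spec_get_number_words; infer_instance

-- ===== CLAIM (what is proved, stated in full; the proofs are below) =====
def Claim_equal_get_number_words : Prop := ∀ (line : String), Dom_get_number_words line → Spec_get_number_words line (get_number_words line)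

-- ===== LEMMAS AND PROOFS =====

-- canonical per-word occurrence list: all indices where w matches in s
def canon (s w : List Char) : List Int :=
  ((List.range s.length).filter (fun i => decide (w <+: s.drop i))).map (fun (i : Nat) => (i : Int))

-- w has no self-overlap (no proper suffix of w is a prefix of w)
def noOv (w : List Char) : Bool :=
  (List.range w.length).all (fun k => k == 0 || !(decide (w.drop k = w.take (w.length - k))))

theorem noOv_no {w : List Char} (h : noOv w = true) {k : Nat} (h1 : 0 < k)
    (h2 : k < w.length) : w.drop k ≠ w.take (w.length - k) := by
  have := List.all_eq_true.mp h k (List.mem_range.mpr h2)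
  simp only [Bool.or_eq_true, beq_iff_eq, Bool.not_eq_true', decide_eq_false_iff_not] at this
  rcases this with h | h
  · omega
  · exact h

-- two matches of a no-self-overlap word cannot overlap
theorem no_middle {s w : List Char} (hno : noOv w = true) {p i : Nat}
    (hp : w <+: s.drop p) (hi1 : p < i) (hi2 : i < p + w.length)
    (hq : w <+: s.drop i) : False := by
  obtain ⟨t, ht⟩ := hp
  set k := i - p with hkdef
  have hk1 : 0 < k := by omega
  have hk2 : k < w.length := by omega
  have hdrop : s.drop i = w.drop k ++ t := by
    have h0 : s.drop i = (s.drop p).drop k := by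
      rw [List.drop_drop]; congr 1; omega
    rw [h0, ← ht, List.drop_append_of_le_length (by omega)]
  rw [hdrop] at hq
  have heq : w = (w.drop k ++ t).take w.length := List.prefix_iff_eq_take.mp hq
  have h1 : (w.drop k ++ t).take (w.length - k) = w.drop k := by
    rw [List.take_append_of_le_length (by simp)]
    exact List.take_of_length_le (by simp)
  have h2 : w.take (w.length - k) = (w.drop k ++ t).take (w.length - k) := by
    calc w.take (w.length - k) = ((w.drop k ++ t).take w.length).take (w.length - k) := by
          rw [← heq]
      _ = (w.drop k ++ t).take (w.length - k) := by
          rw [List.take_take, Nat.min_eq_left (by omega)]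
  exact noOv_no hno hk1 hk2 (h2.trans h1).symm

-- filter of a sorted list splits off its first hit
theorem sorted_filter_cons {p q : Nat → Bool} {l : List Nat} {r : Nat}
    (hl : l.Pairwise (· < ·)) (hr : r ∈ l)
    (hpq : ∀ i ∈ l, p i = true ↔ (i = r ∨ q i = true))
    (hq : ∀ i, q i = true → r < i) :
    l.filter p = r :: l.filter q := by
  induction l with
  | nil => cases hr
  | cons a t ih =>
    rw [List.pairwise_cons] at hl
    obtain ⟨ha, ht⟩ := hl
    by_cases hae : a = r
    · subst hae
      have hpa : p a = true := (hpq a (List.mem_cons_self)).mpr (Or.inl rfl)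
      have hqa : q a = false := by
        by_contra hqa
        exact absurd (hq a (by simpa using hqa)) (lt_irrefl a)
      rw [List.filter_cons, List.filter_cons, hpa, hqa]
      simp only [if_true, Bool.false_eq_true, if_false]
      congr 1
      apply List.filter_congr
      intro i hi
      have hlt := ha i hi
      have hiff := hpq i (List.mem_cons_of_mem _ hi)
      by_cases hq' : q i = true
      · rw [hq', hiff.mpr (Or.inr hq')]
      · have hp' : ¬ p i = true := fun hp' => by
          rcases hiff.mp hp' with h | h
          · omega
          · exact hq' h
        rw [Bool.eq_false_iff.mpr hp', Bool.eq_false_iff.mpr hq']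
    · have hrt : r ∈ t := by
        rcases List.mem_cons.mp hr with h | h
        · exact absurd h.symm hae
        · exact h
      have har : a < r := ha r hrt
      have hqa : q a = false := by
        by_contra hqa
        have := hq a (by simpa using hqa); omega
      have hpa : p a = false := by
        by_contra hpa
        rcases (hpq a List.mem_cons_self).mp (by simpa using hpa) with h | h
        · exact hae h
        · have := hq a h; omega
      rw [List.filter_cons, List.filter_cons, hpa, hqa]
      simp only [Bool.false_eq_true, if_false]
      exact ih ht hrt (fun i hi => hpq i (List.mem_cons_of_mem _ hi))

-- the skip-by-len find loop enumerates exactly the match positions ≥ start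
theorem findAllAux_eq (s w : List Char) (hw : w ≠ []) (hno : noOv w = true) :
    ∀ fuel start, start ≤ s.length → s.length + 1 - start ≤ fuel →
    findAllAux s w start fuel
      = ((List.range s.length).filter
          (fun i => decide (start ≤ i) && decide (w <+: s.drop i))).map (fun (i : Nat) => (i : Int)) := by
  intro fuel
  induction fuel with
  | zero => intro start h1 h2; omega
  | succ f ih =>
    intro start h1 h2
    simp only [findAllAux]
    by_cases hr : PySem.Chars.findFrom s w (start : Int) = -1
    · rw [if_pos hr]
      symm
      rw [List.map_eq_nil_iff, List.filter_eq_nil_iff]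
      intro i _hi
      simp only [Bool.and_eq_true, decide_eq_true_eq, not_and]
      intro hsi hpref
      have hnin := (PySem.Chars.findFrom_natCast_eq_neg_one_iff s w start h1).mp hr
      apply hnin
      have : s.drop i = (s.drop start).drop (i - start) := by
        rw [List.drop_drop]; congr 1; omega
      rw [this] at hpref
      exact hpref.isInfix.trans (List.drop_suffix _ _).isInfix
    · obtain ⟨hstart_le, hpref, hmin⟩ := PySem.Chars.findFrom_natCast_spec s w start h1 hr
      set r := PySem.Chars.findFrom s w (start : Int) with hrdef
      have hr0 : (0 : Int) ≤ r := le_trans (by exact_mod_cast Int.natCast_nonneg start) hstart_le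
      have hrR : r = (r.toNat : Int) := (Int.toNat_of_nonneg hr0).symm
      set R := r.toNat with hRdef
      have hwpos : 0 < w.length := List.length_pos_iff.mpr hw
      have hlen := hpref.length_le
      rw [List.length_drop] at hlen
      have hRlen : R + w.length ≤ s.length := by omega
      have hsR : start ≤ R := by
        have : (start : Int) ≤ (R : Int) := by rw [← hrR]; exact hstart_le
        exact_mod_cast this
      rw [if_neg hr, ih (R + w.length) (by omega) (by omega)]
      have hkey : (List.range s.length).filter
            (fun i => decide (start ≤ i) && decide (w <+: s.drop i))
          = R :: (List.range s.length).filter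
            (fun i => decide (R + w.length ≤ i) && decide (w <+: s.drop i)) := by
        apply sorted_filter_cons (List.pairwise_lt_range)
        · exact List.mem_range.mpr (by omega)
        · intro i _hi
          simp only [Bool.and_eq_true, decide_eq_true_eq]
          constructor
          · rintro ⟨hsi, hpi⟩
            by_cases hiR : i = R
            · exact Or.inl hiR
            · right
              refine ⟨?_, hpi⟩
              by_cases hlt : i < R
              · exact absurd hpi (hmin i hsi hlt)
              · by_contra hge
                exact no_middle hno hpref (by omega) (by omega) hpi
          · rintro (h | ⟨hge, hpi⟩)
            · subst h; exact ⟨hsR, hpref⟩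
            · exact ⟨by omega, hpi⟩
        · intro i hi
          simp only [Bool.and_eq_true, decide_eq_true_eq] at hi
          omega
      simp only [hkey, List.map_cons, hrR]

theorem findAll_eq_canon (line sub : String) (h1 : sub.toList ≠ [])
    (h2 : noOv sub.toList = true) : findAll line sub = canon line.toList sub.toList := by
  rw [findAll, canon, findAllAux_eq _ _ h1 h2 _ 0 (by omega) (by omega)]
  congr 1

-- B-side: zipWith over a mapped state is a map
theorem zipWith_map_self {α β γ : Type} (g : α → β → γ) (f : α → β) (ws : List α) :
    List.zipWith g ws (ws.map f) = ws.map (fun w => g w (f w)) := by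
  induction ws with
  | nil => rfl
  | cons a t ih => simp [ih]

-- loop interchange: the single pass over indices fills each bucket with its word's match list
theorem bfold_eq (s : List Char) (ws : List (List Char)) (n : Nat) :
    (List.range n).foldl
      (fun (bs : List (List Int)) (i : Nat) =>
        List.zipWith
          (fun w b =>
            if PySem.List.slice s (some (i : Int)) (some ((i : Int) + (w.length : Int))) = w
            then b ++ [(i : Int)] else b)
          ws bs)
      (ws.map fun _ => ([] : List Int))
    = ws.map (fun w =>
        ((List.range n).filter
          (fun (i : Nat) => decide (PySem.List.slice s (some (i : Int)) (some ((i : Int) + (w.length : Int))) = w))).map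
          (fun (i : Nat) => (i : Int))) := by
  induction n with
  | zero => simp
  | succ n ih =>
    rw [List.range_succ, List.foldl_append, ih, List.foldl_cons, List.foldl_nil,
        zipWith_map_self]
    apply List.map_congr_left
    intro w _
    by_cases h : PySem.List.slice s (some (n : Int)) (some ((n : Int) + (w.length : Int))) = w
    · simp [List.filter_append, h]
    · simp [List.filter_append, h]

theorem slice_cond (s w : List Char) (i : Nat) :
    (PySem.List.slice s (some (i : Int)) (some ((i : Int) + (w.length : Int))) = w)
      ↔ w <+: s.drop i := by
  rw [PySem.List.slice_natCast_add, List.prefix_iff_eq_take, eq_comm]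

theorem enumerate_map {α β : Type} (f : α → β) (l : List α) (k : Int) :
    PySem.List.enumerate (l.map f) k = (PySem.List.enumerate l k).map (fun p => (p.1, f p.2)) := by
  induction l generalizing k with
  | nil => simp [PySem.List.enumerate_nil]
  | cons a t ih => simp [PySem.List.enumerate_cons, ih]

theorem filter_map_eq_filterMap {α β : Type} (p : α → Bool) (f : α → β) (l : List α) :
    (l.filter p).map f = l.filterMap (fun a => if p a then some (f a) else none) := by
  induction l with
  | nil => rfl
  | cons a t ih =>
    rw [List.filter_cons, List.filterMap_cons]
    by_cases h : p a <;> simp [h, ih]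

-- A reduces to a filterMap over enumerate of the word list
theorem a_eq (line : String) :
    get_number_words line
      = (PySem.List.enumerate number_word_list).filterMap
          (fun iw => if (findAll line iw.2).length ≠ 0
                     then some (PySem.Int.toStr (iw.1 + 1), findAll line iw.2) else none) := by
  rw [get_number_words]
  have hbody : (fun (d : PySem.Dict String (List Int)) (iw : Int × String) =>
      let wm := findAll line iw.2
      if wm.length ≠ 0 then d.insert (PySem.Int.toStr (iw.1 + 1)) wm else d)
    = (fun d iw => if (decide ((findAll line iw.2).length ≠ 0)) = true
                   then d.insert (PySem.Int.toStr (iw.1 + 1)) (findAll line iw.2) else d) := by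
    funext d iw
    by_cases h : (findAll line iw.2).length ≠ 0 <;> simp [h]
  rw [hbody, ← List.foldl_filter]
  rw [PySem.Dict.items_foldl_insert_fresh _ _ _ _
      (fun a _ => PySem.Dict.contains_empty _)
      ?nodup]
  case nodup =>
    have hfull : ((PySem.List.enumerate number_word_list).map
        (fun iw => PySem.Int.toStr (iw.1 + 1))).Nodup := by decide
    exact List.Nodup.sublist (List.Sublist.map _ List.filter_sublist) hfull
  rw [filter_map_eq_filterMap]
  have hemp : (PySem.Dict.empty : PySem.Dict String (List Int)).items = [] := rfl
  simp only [hemp, List.nil_append]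
  apply List.filterMap_congr
  intro iw _
  split_ifs with h1 h2 <;> first | rfl | simp_all

-- B reduces to the same filterMap with canon in place of findAll
theorem b_eq (line : String) :
    get_number_words_alt line
      = (PySem.List.enumerate number_word_list).filterMap
          (fun iw => if (canon line.toList iw.2.toList).length ≠ 0
                     then some (PySem.Int.toStr (iw.1 + 1), canon line.toList iw.2.toList) else none) := by
  simp only [get_number_words_alt]
  rw [bfold_eq]
  have hws : (number_word_list.map String.toList).map (fun w =>
        ((List.range line.toList.length).filter
          (fun (i : Nat) => decide (PySem.List.slice line.toList (some (i : Int)) (some ((i : Int) + (w.length : Int))) = w))).map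
          (fun (i : Nat) => (i : Int)))
      = (number_word_list.map String.toList).map (fun w => canon line.toList w) := by
    apply List.map_congr_left
    intro w _
    rw [canon]
    congr 1
    apply List.filter_congr
    intro i _
    exact decide_eq_decide.mpr (slice_cond line.toList w i)
  rw [hws, List.map_map, enumerate_map]
  rw [List.filterMap_map]
  apply List.filterMap_congr
  intro iw _
  simp only [Function.comp]
  by_cases h : canon line.toList iw.2.toList = []
  · simp [h]
  · have : (canon line.toList iw.2.toList).length ≠ 0 := by
      simpa [List.length_eq_zero_iff] using h
    simp [h, this]

-- ===== VERDICT (by name: the statement is the Claim_ definition above) =====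
theorem get_number_words_spec : Claim_equal_get_number_words := by
  intro line _
  unfold Spec_get_number_words
  rw [a_eq, b_eq]
  apply List.filterMap_congr
  intro iw hiw
  have hsub : iw.2 ∈ number_word_list := by
    obtain ⟨k, hk, hp⟩ := (PySem.List.mem_enumerate_iff _ _ _).mp hiw
    rw [hp]
    exact List.getElem_mem hk
  have hfc : findAll line iw.2 = canon line.toList iw.2.toList := by
    have h9 : iw.2 = "one" ∨ iw.2 = "two" ∨ iw.2 = "three" ∨ iw.2 = "four" ∨ iw.2 = "five"
        ∨ iw.2 = "six" ∨ iw.2 = "seven" ∨ iw.2 = "eight" ∨ iw.2 = "nine" := by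
      simpa [number_word_list] using hsub
    rcases h9 with h | h | h | h | h | h | h | h | h <;>
      (rw [h]; exact findAll_eq_canon _ _ (by decide) (by decide))
  rw [hfc]
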